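-- pv_equiv track=rewrite | github.com/reefbot/reef-cli | tests/dummy_scripts/basic.py | duplicate_and_sort_list
-- ===== SOURCE A (Python) =====
-- def duplicate_and_sort_list(lst):
--     new_list = []
--     for item in lst:
--         new_list.append(item)
--     for item in lst:
--         new_list.append(item)
--     new_list.sort()
--     return new_list
-- ===== SOURCE B (Python) =====
-- def duplicate_and_sort_list(lst):
--     result = []
--     for x in sorted(lst):
--         result.append(x)
--         result.append(x)
--     return result
-- ===== Notes on version B (the rewrite author's own statement) =====
-- stated objective: alternative
-- what changed: B sorts only the n original elements once and then emits each element twice in a single expansion pass, instead of A's building a 2n-element concatenation and sorting all 2n elements.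
import Mathlib
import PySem

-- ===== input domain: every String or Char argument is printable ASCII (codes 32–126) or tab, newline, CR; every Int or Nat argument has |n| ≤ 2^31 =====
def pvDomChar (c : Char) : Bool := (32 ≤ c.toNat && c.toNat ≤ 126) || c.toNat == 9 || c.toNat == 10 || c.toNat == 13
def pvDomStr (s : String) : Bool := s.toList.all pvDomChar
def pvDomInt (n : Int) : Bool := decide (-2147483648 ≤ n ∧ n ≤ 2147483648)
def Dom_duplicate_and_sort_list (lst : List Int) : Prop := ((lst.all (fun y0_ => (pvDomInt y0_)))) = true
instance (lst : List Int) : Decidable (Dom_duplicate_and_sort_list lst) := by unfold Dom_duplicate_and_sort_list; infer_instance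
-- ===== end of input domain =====

-- B sorts the n original elements once and emits each twice in one expansion pass,
-- instead of A's concatenate-to-2n-then-sort; same cost class, different phase order.

-- ===== PORT A =====
def duplicate_and_sort_list (lst : List Int) : List Int :=
  let new_list : List Int := []
  let new_list := lst.foldl (fun acc item => acc ++ [item]) new_list
  let new_list := lst.foldl (fun acc item => acc ++ [item]) new_list
  PySem.List.sorted new_list (fun x => x) false

-- ===== PORT B =====
def duplicate_and_sort_list_alt (lst : List Int) : List Int :=
  (PySem.List.sorted lst (fun x => x) false).foldl (fun acc x => acc ++ [x, x]) []

-- ===== PRECONDITION & SPEC =====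
def Spec_duplicate_and_sort_list (lst : List Int) (out : List Int) : Prop := out = duplicate_and_sort_list_alt lst
instance (lst : List Int) (out : List Int) : Decidable (Spec_duplicate_and_sort_list lst out) := by unfold Spec_duplicate_and_sort_list; infer_instance

-- ===== CLAIM (what is proved, stated in full; the proofs are below) =====
def Claim_equal_duplicate_and_sort_list : Prop := ∀ (lst : List Int), Dom_duplicate_and_sort_list lst → Spec_duplicate_and_sort_list lst (duplicate_and_sort_list lst)

-- ===== LEMMAS AND PROOFS =====

-- duplicating each element of s is a permutation of s ++ s
lemma flatMap_dup_perm (s : List Int) :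
    (s.flatMap (fun x => [x, x])).Perm (s ++ s) := by
  induction s with
  | nil => simp
  | cons x t ih =>
    simp only [List.flatMap_cons, List.cons_append]
    exact ((ih.cons x).cons x).trans ((List.perm_middle.symm).cons x)

-- duplicating each element preserves sortedness
lemma flatMap_dup_pairwise (s : List Int) (h : s.Pairwise (· ≤ ·)) :
    (s.flatMap (fun x => [x, x])).Pairwise (· ≤ ·) := by
  induction s with
  | nil => simp
  | cons x t ih =>
    rcases List.pairwise_cons.mp h with ⟨hx, ht⟩
    simp only [List.flatMap_cons]
    refine List.pairwise_cons.mpr ⟨?_, List.pairwise_cons.mpr ⟨?_, ih ht⟩⟩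
    · intro y hy
      rcases List.mem_cons.mp hy with rfl | hy
      · exact le_refl _
      · rcases List.mem_flatMap.mp hy with ⟨z, hz, hm⟩
        simp at hm; subst hm
        exact hx _ hz
    · intro y hy
      rcases List.mem_flatMap.mp hy with ⟨z, hz, hm⟩
      simp at hm; subst hm
      exact hx _ hz

lemma sorted_double (lst : List Int) :
    PySem.List.sorted (lst ++ lst) (fun x => x) false
      = (PySem.List.sorted lst (fun x => x) false).flatMap (fun x => [x, x]) := by
  apply PySem.List.sorted_id_eq_of_perm_of_pairwise
  · exact (flatMap_dup_perm _).trans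
      (List.Perm.append (PySem.List.sorted_perm ..) (PySem.List.sorted_perm ..))
  · exact flatMap_dup_pairwise _ (by simpa using PySem.List.sorted_pairwise lst (fun x => x))

-- ===== VERDICT (by name: the statement is the Claim_ definition above) =====
theorem duplicate_and_sort_list_spec : Claim_equal_duplicate_and_sort_list := by
  intro lst _
  unfold Spec_duplicate_and_sort_list duplicate_and_sort_list duplicate_and_sort_list_alt
  simp only [PySem.List.foldl_append_singleton_eq_self,
    PySem.List.foldl_append_eq_flatMap, List.nil_append]
  exact sorted_double lst
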